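-- pv_equiv track=rewrite | github.com/Bruhtek/agh-wdi | zestawy/04 - struktury danych/z143.py | calculate_values
-- ===== SOURCE A (Python) =====
-- def calculate_values(seq: list[int])->tuple[int,int]:
--     first_sum = seq[0]
--     n = len(seq)
--     for i in range(1, n-1, 2):
--         first_sum += seq[i] * seq[i+1]
--     if n % 2 == 0:
--         first_sum += seq[n-1]
--
--     second_sum = 0
--     for i in range(0, n-1, 2):
--         second_sum += seq[i] * seq[i+1]
--     if n % 2 == 1:
--         second_sum += seq[n-1]
--
--     return first_sum, second_sum
-- ===== SOURCE B (Python) =====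
-- def calculate_values(seq: list[int]) -> tuple[int, int]:
--     # One pass over adjacent pairs with a swap accumulator: after the loop the
--     # two cells hold the even-position and odd-position pair-product sums.
--     head, last = seq[0], seq[-1]
--     x = y = 0
--     for a, b in zip(seq, seq[1:]):
--         x, y = y, x + a * b
--     if len(seq) % 2 == 0:
--         return head + x + last, y
--     return head + y, x + last
-- ===== Notes on version B (the rewrite author's own statement) =====
-- stated objective: alternative
-- what changed: Replaces A's two step-2 index loops over range(...) by a single pass over zip(seq, seq[1:]) with a swap accumulator that holds both alternating pair-product sums at once.
-- outside the precondition, e.g. on calculate_values([]): A raises IndexError, B raises IndexError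
import Mathlib
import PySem

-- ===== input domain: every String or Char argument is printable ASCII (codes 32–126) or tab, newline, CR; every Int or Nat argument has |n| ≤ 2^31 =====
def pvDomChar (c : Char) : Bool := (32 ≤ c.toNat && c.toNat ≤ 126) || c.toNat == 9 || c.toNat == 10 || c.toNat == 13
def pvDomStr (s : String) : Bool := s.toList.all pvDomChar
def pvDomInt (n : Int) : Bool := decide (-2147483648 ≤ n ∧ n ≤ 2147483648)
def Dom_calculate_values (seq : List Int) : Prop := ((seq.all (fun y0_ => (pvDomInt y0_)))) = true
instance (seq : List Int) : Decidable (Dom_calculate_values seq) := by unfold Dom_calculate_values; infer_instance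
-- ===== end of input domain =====

-- B replaces A's two step-2 index loops by a single pass over zipped adjacent
-- pairs with a swap accumulator (objective: alternative decomposition, same cost).

-- ===== PORT A =====
-- the range indices i, i+1 and n-1 are always in range for nonempty seq (Pre_), so .getD 0 never takes the default
def calculate_values (seq : List Int) : Int × Int :=
  let n : Int := (seq.length : Int)
  let first0 : Int := (PySem.List.pyGet? seq 0).getD 0
  let first1 : Int :=
    (PySem.List.pyRange 1 (n - 1) 2).foldl
      (fun acc i => acc + (PySem.List.pyGet? seq i).getD 0 * (PySem.List.pyGet? seq (i + 1)).getD 0) first0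
  let first : Int := if PySem.Int.mod n 2 = 0 then first1 + (PySem.List.pyGet? seq (n - 1)).getD 0 else first1
  let second1 : Int :=
    (PySem.List.pyRange 0 (n - 1) 2).foldl
      (fun acc i => acc + (PySem.List.pyGet? seq i).getD 0 * (PySem.List.pyGet? seq (i + 1)).getD 0) 0
  let second : Int := if PySem.Int.mod n 2 = 1 then second1 + (PySem.List.pyGet? seq (n - 1)).getD 0 else second1
  (first, second)

-- ===== PORT B =====
-- the head and last subscripts are in range for nonempty seq (Pre_), so .getD 0 never takes the default
def calculate_values_alt (seq : List Int) : Int × Int :=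
  let head : Int := (PySem.List.pyGet? seq 0).getD 0
  let last : Int := (PySem.List.pyGet? seq (-1)).getD 0
  let p : Int × Int :=
    (seq.zip (PySem.List.slice seq (some 1) none)).foldl
      (fun xy ab => (xy.2, xy.1 + ab.1 * ab.2)) (0, 0)
  if PySem.Int.mod (seq.length : Int) 2 = 0 then (head + p.1 + last, p.2)
  else (head + p.2, p.1 + last)

-- ===== PRECONDITION & SPEC =====
-- Pre_ excludes only the empty list, on which Python A raises IndexError on its first subscript (B raises there too).
def Pre_calculate_values (seq : List Int) : Prop := seq ≠ []
instance (seq : List Int) : Decidable (Pre_calculate_values seq) := by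
  unfold Pre_calculate_values; infer_instance
def pvWitness_calculate_values : List Int := ([1, 2, 3])

def Spec_calculate_values (seq : List Int) (out : Int × Int) : Prop := out = calculate_values_alt seq
instance (seq : List Int) (out : Int × Int) : Decidable (Spec_calculate_values seq out) := by
  unfold Spec_calculate_values; infer_instance

-- ===== CLAIM (what is proved, stated in full; the proofs are below) =====
def Claim_equal_calculate_values : Prop := ∀ (seq : List Int), Dom_calculate_values seq → Pre_calculate_values seq → Spec_calculate_values seq (calculate_values seq)

-- ===== LEMMAS AND PROOFS =====

-- sum of products of adjacent pairs starting at even positions: s0*s1 + s2*s3 + …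
def pvE : List Int → Int
  | [] => 0
  | [_] => 0
  | a :: b :: r => a * b + pvE r

-- (even-position, odd-position) pair-product sums of a pair list
def pvP : List (Int × Int) → Int × Int
  | [] => (0, 0)
  | p :: r => (p.1 * p.2 + (pvP r).2, (pvP r).1)

lemma pv_getD_two_step (a b : Int) (l : List Int) (j : Nat) :
    (a :: b :: l).getD (2 * (j + 1)) 0 = l.getD (2 * j) 0 := by
  rw [show 2 * (j + 1) = (2 * j + 1) + 1 by ring, List.getD_cons_succ, List.getD_cons_succ]

lemma pv_getD_two_step' (a b : Int) (l : List Int) (j : Nat) :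
    (a :: b :: l).getD (2 * (j + 1) + 1) 0 = l.getD (2 * j + 1) 0 := by
  rw [show 2 * (j + 1) + 1 = (2 * j + 1 + 1) + 1 by ring, List.getD_cons_succ, List.getD_cons_succ]

-- the even-position pair-product sum as a sum over indices
lemma pv_sumE (seq : List Int) :
    ((List.range (seq.length / 2)).map
      (fun k => seq.getD (2 * k) 0 * seq.getD (2 * k + 1) 0)).sum = pvE seq := by
  induction seq using pvE.induct with
  | case1 => simp [pvE]
  | case2 a => simp [pvE]
  | case3 a b r ih =>
    have hlen : (a :: b :: r).length / 2 = r.length / 2 + 1 := by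
      simp only [List.length_cons]; omega
    rw [hlen, List.range_succ_eq_map, List.map_cons, List.map_map, List.sum_cons]
    have hmap : (List.map ((fun k => (a :: b :: r).getD (2 * k) 0 * (a :: b :: r).getD (2 * k + 1) 0) ∘ Nat.succ)
        (List.range (r.length / 2))) =
        (List.map (fun k => r.getD (2 * k) 0 * r.getD (2 * k + 1) 0) (List.range (r.length / 2))) := by
      refine List.map_congr_left (fun k _ => ?_)
      simp only [Function.comp, Nat.succ_eq_add_one, pv_getD_two_step, pv_getD_two_step']
    rw [hmap, ih]
    simp [pvE]

-- B's swap-accumulator loop computes the two alternating pair-product sums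
lemma pv_swapFold (ps : List (Int × Int)) (x y : Int) :
    ps.foldl (fun xy ab => (xy.2, xy.1 + ab.1 * ab.2)) (x, y) =
      if ps.length % 2 = 0 then (x + (pvP ps).1, y + (pvP ps).2)
      else (y + (pvP ps).2, x + (pvP ps).1) := by
  induction ps generalizing x y with
  | nil => simp [pvP]
  | cons p r ih =>
    simp only [List.foldl_cons, ih, pvP, List.length_cons]
    rcases Nat.mod_two_eq_zero_or_one r.length with hr | hr <;>
      simp [hr, Nat.add_mod, Prod.ext_iff] <;> ring

-- the zipped adjacent-pair list carries (pvE seq, pvE (tail)) as its alternating sums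
lemma pv_zipP (seq : List Int) :
    pvP (seq.zip (seq.drop 1)) = (pvE seq, pvE (seq.drop 1)) := by
  induction seq with
  | nil => simp [pvP, pvE]
  | cons a t ih =>
    cases t with
    | nil => simp [pvP, pvE]
    | cons b r =>
      simp only [List.drop_one, List.tail_cons, List.zip_cons_cons, pvP, pvE]
      rw [show (b :: r).zip r = (b :: r).zip ((b :: r).drop 1) by simp]
      rw [ih]
      simp

lemma pv_range_count_zero (m : Nat) :
    (if (0 : Int) < (m : Int) + 1 - 1 then (((m : Int) + 1 - 1 - 0 + 2 - 1) / 2).toNat else 0) = (m + 1) / 2 := by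
  split_ifs with h <;> omega

lemma pv_range_count_one (m : Nat) :
    (if (1 : Int) < (m : Int) + 1 - 1 then (((m : Int) + 1 - 1 - 1 + 2 - 1) / 2).toNat else 0) = m / 2 := by
  split_ifs with h <;> omega

-- A's second loop (start 0) sums the even-position pair products
lemma pv_loop_even (h : Int) (t : List Int) (c : Int) :
    (PySem.List.pyRange 0 (((h :: t).length : Int) - 1) 2).foldl
      (fun acc i => acc + (PySem.List.pyGet? (h :: t) i).getD 0 * (PySem.List.pyGet? (h :: t) (i + 1)).getD 0) c
      = c + pvE (h :: t) := by
  rw [PySem.List.foldl_add, PySem.List.pyRange_of_pos 0 _ (by norm_num), List.map_map]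
  have hc : (if (0 : Int) < ((h :: t).length : Int) - 1
      then ((((h :: t).length : Int) - 1 - 0 + 2 - 1) / 2).toNat else 0) = (h :: t).length / 2 := by
    simpa [List.length_cons] using pv_range_count_zero t.length
  rw [hc]
  have hmap : (List.map ((fun i => (PySem.List.pyGet? (h :: t) i).getD 0 * (PySem.List.pyGet? (h :: t) (i + 1)).getD 0)
        ∘ (fun k : Nat => (0 : Int) + 2 * (k : Int))) (List.range ((h :: t).length / 2))) =
      (List.map (fun k => (h :: t).getD (2 * k) 0 * (h :: t).getD (2 * k + 1) 0)
        (List.range ((h :: t).length / 2))) := by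
    refine List.map_congr_left (fun k _ => ?_)
    have e1 : (0 : Int) + 2 * (k : Int) = ((2 * k : Nat) : Int) := by push_cast; ring
    have e2 : ((2 * k : Nat) : Int) + 1 = ((2 * k + 1 : Nat) : Int) := by push_cast; ring
    simp only [Function.comp, e1, e2, PySem.List.pyGet?_natCast]
    simp [List.getD_eq_getElem?_getD]
  rw [hmap, pv_sumE]

-- A's first loop (start 1) sums the odd-position pair products, i.e. pvE of the tail
lemma pv_loop_odd (h : Int) (t : List Int) (c : Int) :
    (PySem.List.pyRange 1 (((h :: t).length : Int) - 1) 2).foldl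
      (fun acc i => acc + (PySem.List.pyGet? (h :: t) i).getD 0 * (PySem.List.pyGet? (h :: t) (i + 1)).getD 0) c
      = c + pvE t := by
  rw [PySem.List.foldl_add, PySem.List.pyRange_of_pos 1 _ (by norm_num), List.map_map]
  have hc : (if (1 : Int) < ((h :: t).length : Int) - 1
      then ((((h :: t).length : Int) - 1 - 1 + 2 - 1) / 2).toNat else 0) = t.length / 2 := by
    simpa [List.length_cons] using pv_range_count_one t.length
  rw [hc]
  have hmap : (List.map ((fun i => (PySem.List.pyGet? (h :: t) i).getD 0 * (PySem.List.pyGet? (h :: t) (i + 1)).getD 0)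
        ∘ (fun k : Nat => (1 : Int) + 2 * (k : Int))) (List.range (t.length / 2))) =
      (List.map (fun k => t.getD (2 * k) 0 * t.getD (2 * k + 1) 0) (List.range (t.length / 2))) := by
    refine List.map_congr_left (fun k _ => ?_)
    have e1 : (1 : Int) + 2 * (k : Int) = ((2 * k + 1 : Nat) : Int) := by push_cast; ring
    have e2 : ((2 * k + 1 : Nat) : Int) + 1 = ((2 * k + 1 + 1 : Nat) : Int) := by push_cast; ring
    simp only [Function.comp, e1, e2, PySem.List.pyGet?_natCast]
    simp [List.getD_eq_getElem?_getD]
  rw [hmap, pv_sumE]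

-- index -1 denotes the same element as index len-1 for nonempty seq
lemma pv_last (h : Int) (t : List Int) :
    PySem.List.pyGet? (h :: t) (-1) = PySem.List.pyGet? (h :: t) (((h :: t).length : Int) - 1) := by
  have e : ((h :: t).length : Int) - 1 = ((t.length : Nat) : Int) := by
    simp [List.length_cons]
  rw [e, PySem.List.pyGet?_natCast]
  simp [PySem.List.pyGet?, PySem.List.pyIdx?]

-- ===== VERDICT (by name: the statement is the Claim_ definition above) =====
theorem calculate_values_spec : Claim_equal_calculate_values := by
  intro seq _ hpre
  obtain ⟨h, t, rfl⟩ : ∃ h t, seq = h :: t := by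
    cases seq with
    | nil => exact absurd rfl hpre
    | cons h t => exact ⟨h, t, rfl⟩
  unfold Spec_calculate_values calculate_values calculate_values_alt
  simp only [pv_loop_even, pv_loop_odd, pv_last]
  rw [show PySem.List.slice (h :: t) (some 1) none = (h :: t).drop 1 from
    PySem.List.slice_from _ (by norm_num)]
  rw [pv_swapFold]
  have hzl : ((h :: t).zip ((h :: t).drop 1)).length = t.length := by
    simp [List.length_zip]
  rw [pv_zipP, hzl]
  have hmod : PySem.Int.mod (((h :: t).length : Nat) : Int) 2 = (((h :: t).length % 2 : Nat) : Int) :=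
    PySem.Int.mod_natCast _ 2
  rw [hmod]
  simp only [List.length_cons, List.drop_one, List.tail_cons]
  have h1 : (t.length + 1) % 2 = 1 - t.length % 2 := by omega
  rcases Nat.mod_two_eq_zero_or_one t.length with ht | ht <;> simp [h1, ht]
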